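-- pv_equiv track=rewrite | github.com/palaseus/egdol | egdol/omnimind/reflexive/analyzer.py | _find_load_imbalance
-- ===== SOURCE A (Python) =====
-- def _find_load_imbalance(skill_stats) -> bool:
--     """Check for load imbalance across skills."""
--     if len(skill_stats) < 2:
--         return False
--
--     execution_counts = [stats.get('execution_count', 0) for stats in skill_stats.values()]
--
--     if not execution_counts:
--         return False
--
--     max_count = max(execution_counts)
--     min_count = min(execution_counts)
--
--     # Consider imbalanced if max is more than 3x min
--     return max_count > 3 * min_count and max_count > 0
-- ===== SOURCE B (Python) =====
-- def _find_load_imbalance(skill_stats) -> bool: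
--     """Check for load imbalance across skills."""
--     if len(skill_stats) < 2:
--         return False
--     ordered = sorted(stats.get('execution_count', 0) for stats in skill_stats.values())
--     return ordered[-1] > 3 * ordered[0] and ordered[-1] > 0
-- ===== Notes on version B (the rewrite author's own statement) =====
-- stated objective: alternative
-- what changed: Replaces the separate max() and min() scans over an intermediate counts list by sorting the counts once and comparing the two ends of the sorted list (ordered[-1] vs ordered[0]).
import Mathlib
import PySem

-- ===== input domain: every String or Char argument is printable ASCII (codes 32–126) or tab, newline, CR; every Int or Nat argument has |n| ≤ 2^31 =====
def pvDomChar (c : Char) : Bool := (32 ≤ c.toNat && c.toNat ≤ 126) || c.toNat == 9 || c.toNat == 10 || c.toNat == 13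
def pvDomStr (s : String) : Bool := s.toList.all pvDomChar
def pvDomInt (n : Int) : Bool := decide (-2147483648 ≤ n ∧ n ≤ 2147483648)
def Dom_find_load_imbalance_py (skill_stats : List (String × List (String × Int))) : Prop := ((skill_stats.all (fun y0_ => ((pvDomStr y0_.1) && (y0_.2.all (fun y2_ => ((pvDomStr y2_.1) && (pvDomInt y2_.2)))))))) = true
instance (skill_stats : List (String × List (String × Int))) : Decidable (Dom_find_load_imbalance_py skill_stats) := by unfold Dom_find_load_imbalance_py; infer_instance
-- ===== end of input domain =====

-- ===== PORT A =====
-- B sorts the counts once and compares the two ends instead of separate max()/min() scans (alternative algorithm).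
def find_load_imbalance_py (skill_stats : List (String × List (String × Int))) : Bool :=
  if skill_stats.length < 2 then false
  else
    let execution_counts := skill_stats.map (fun stats => PySem.Dict.getD (PySem.Dict.mk stats.2) "execution_count" 0)
    if execution_counts = [] then false
    else
      match PySem.List.max? execution_counts (fun x => x), PySem.List.min? execution_counts (fun x => x) with
      | some max_count, some min_count => decide (max_count > 3 * min_count ∧ max_count > 0)
      | _, _ => false

-- ===== PORT B =====
def find_load_imbalance_py_alt (skill_stats : List (String × List (String × Int))) : Bool :=
  if skill_stats.length < 2 then false
  else
    let ordered := PySem.List.sorted (skill_stats.map (fun stats => PySem.Dict.getD (PySem.Dict.mk stats.2) "execution_count" 0)) (fun x => x) false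
    -- ordered[-1] / ordered[0]: IndexError is impossible here (len ≥ 2), so .getD false is unreachable
    ((PySem.List.pyGet? ordered (-1)).bind (fun lst =>
      (PySem.List.pyGet? ordered 0).map (fun fst => decide (lst > 3 * fst ∧ lst > 0)))).getD false

-- ===== PRECONDITION & SPEC =====
def Spec_find_load_imbalance_py (skill_stats : List (String × List (String × Int))) (out : Bool) : Prop := out = find_load_imbalance_py_alt skill_stats
instance (skill_stats : List (String × List (String × Int))) (out : Bool) : Decidable (Spec_find_load_imbalance_py skill_stats out) := by unfold Spec_find_load_imbalance_py; infer_instance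

-- ===== CLAIM (what is proved, stated in full; the proofs are below) =====
def Claim_equal_find_load_imbalance_py : Prop := ∀ (skill_stats : List (String × List (String × Int))), Dom_find_load_imbalance_py skill_stats → Spec_find_load_imbalance_py skill_stats (find_load_imbalance_py skill_stats)

-- ===== LEMMAS AND PROOFS =====

-- the first element of the ascending-sorted list is the running-min of the list
theorem pv_sorted_first (c0 : Int) (cs : List Int) :
    PySem.List.pyGet? (PySem.List.sorted (c0 :: cs) (fun x => x) false) 0 = some (cs.foldl min c0) := by
  have hne : PySem.List.sorted (c0 :: cs) (fun x => x) false ≠ [] := by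
    simp [PySem.List.sorted_eq_nil_iff]
  obtain ⟨h0, rest, hord⟩ := List.exists_cons_of_ne_nil hne
  rw [hord, PySem.List.pyGet?_zero_cons]
  congr 1
  have hmin := PySem.List.min?_id_cons c0 cs
  have h1 : h0 ∈ c0 :: cs := by
    rw [← PySem.List.mem_sorted (key := fun x => x) (rev := false)]
    rw [hord]; exact List.mem_cons_self
  have h2 : ∀ y ∈ c0 :: cs, h0 ≤ y := PySem.List.key_head_sorted_le (c0 :: cs) (fun x => x) hord
  exact le_antisymm (h2 _ (PySem.List.min?_mem hmin)) (PySem.List.min?_isMin hmin _ h1)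

-- the last element of the ascending-sorted list is the running-max of the list
theorem pv_sorted_last (c0 : Int) (cs : List Int) :
    PySem.List.pyGet? (PySem.List.sorted (c0 :: cs) (fun x => x) false) (-1) = some (cs.foldl max c0) := by
  have hne : PySem.List.sorted (c0 :: cs) (fun x => x) false ≠ [] := by
    simp [PySem.List.sorted_eq_nil_iff]
  rw [PySem.List.pyGet?_neg_one, List.getLast?_eq_some_getLast hne]
  congr 1
  have hmax := PySem.List.max?_id_cons c0 cs
  have hmem : (PySem.List.sorted (c0 :: cs) (fun x => x) false).getLast hne ∈ c0 :: cs := by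
    rw [← PySem.List.mem_sorted (key := fun x => x) (rev := false)]
    exact List.getLast_mem hne
  have hge : ∀ y ∈ c0 :: cs, y ≤ (PySem.List.sorted (c0 :: cs) (fun x => x) false).getLast hne := by
    intro y hy
    obtain ⟨p, hp, hpy⟩ := List.mem_iff_getElem.mp
      ((PySem.List.mem_sorted (c0 :: cs) (fun x => x) false y).mpr hy)
    rw [List.getLast_eq_getElem, ← hpy]
    exact PySem.List.sorted_id_getElem_mono (c0 :: cs) (by omega) (by omega)
  exact le_antisymm (PySem.List.max?_isMax hmax _ hmem) (hge _ (PySem.List.max?_mem hmax))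

-- ===== VERDICT (by name: the statement is the Claim_ definition above) =====
theorem find_load_imbalance_py_spec : Claim_equal_find_load_imbalance_py := by
  intro ss _
  unfold Spec_find_load_imbalance_py find_load_imbalance_py find_load_imbalance_py_alt
  match ss with
  | [] => simp
  | [x] => simp
  | a :: b :: t =>
    have hlen : ¬ ((a :: b :: t).length < 2) := by simp
    simp only [if_neg hlen, List.map_cons]
    rw [pv_sorted_first, pv_sorted_last, PySem.List.max?_id_cons, PySem.List.min?_id_cons]
    simp
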